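-- pv_equiv track=rewrite | github.com/mike-burl/advent-of-code-2021 | day 23/amphipod.py | popFish
-- ===== SOURCE A (Python) =====
-- def popFish(door):
--     newDoor = []
--     fishPopped = False
--     for char in door:
--         if char == 'E':
--             newDoor.append(char)
--         elif not fishPopped:
--             newDoor.append('E')
--             fishPopped = True
--         else:
--             newDoor.append(char)
--     return newDoor
-- ===== SOURCE B (Python) =====
-- def popFish(door):
--     idx = next((i for i, c in enumerate(door) if c != 'E'), None)
--     result = list(door)
--     if idx is not None:
--         result[idx] = 'E'
--     return result
-- ===== Notes on version B (the rewrite author's own statement) =====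
-- stated objective: simpler
-- what changed: Locate the index of the first non-'E' element, then copy the list and overwrite that single position, replacing A's char-by-char rebuild guarded by a boolean flag.
import Mathlib
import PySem

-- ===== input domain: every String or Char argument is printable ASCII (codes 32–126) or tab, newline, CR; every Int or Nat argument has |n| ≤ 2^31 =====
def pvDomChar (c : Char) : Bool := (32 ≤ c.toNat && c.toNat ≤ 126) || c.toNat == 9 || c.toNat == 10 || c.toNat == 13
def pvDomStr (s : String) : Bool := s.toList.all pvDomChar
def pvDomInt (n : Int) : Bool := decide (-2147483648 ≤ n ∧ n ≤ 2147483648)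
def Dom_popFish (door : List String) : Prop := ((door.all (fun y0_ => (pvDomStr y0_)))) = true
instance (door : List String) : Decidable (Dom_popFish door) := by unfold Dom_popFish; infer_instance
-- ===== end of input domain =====

-- B replaces A's flag-guarded element-by-element rebuild with find-first-index then a single targeted overwrite (simpler decomposition).

-- ===== PORT A =====
-- A's loop over door carrying the accumulator newDoor and the flag fishPopped.
def popFishLoop (door : List String) (fishPopped : Bool) : List String :=
  match door with
  | [] => []
  | c :: rest =>
    if c == "E" then c :: popFishLoop rest fishPopped
    else if !fishPopped then "E" :: popFishLoop rest true
    else c :: popFishLoop rest fishPopped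

def popFish (door : List String) : List String := popFishLoop door false

-- ===== PORT B =====
def popFish_alt (door : List String) : List String :=
  match door.findIdx? (fun c => c ≠ "E") with
  | none => door
  | some i => door.set i "E"

-- ===== PRECONDITION & SPEC =====
def Spec_popFish (door : List String) (out : List String) : Prop := out = popFish_alt door
instance (door : List String) (out : List String) : Decidable (Spec_popFish door out) := by unfold Spec_popFish; infer_instance

-- ===== CLAIM (what is proved, stated in full; the proofs are below) =====
def Claim_equal_popFish : Prop := ∀ (door : List String), Dom_popFish door → Spec_popFish door (popFish door)

-- ===== LEMMAS AND PROOFS =====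

-- once the fish is popped, A's loop copies the rest unchanged
theorem popFishLoop_true (door : List String) : popFishLoop door true = door := by
  induction door with
  | nil => rfl
  | cons c rest ih => by_cases h : c = "E" <;> simp [popFishLoop, h, ih]

theorem popFish_eq_alt (door : List String) : popFish door = popFish_alt door := by
  unfold popFish
  induction door with
  | nil => rfl
  | cons c rest ih =>
    by_cases h : c = "E"
    · subst h
      simp only [popFishLoop, beq_self_eq_true, if_true, ih, popFish_alt,
        List.findIdx?_cons]
      simp only [ne_eq, not_true_eq_false, decide_false, Bool.false_eq_true, if_false]
      cases hf : (rest.findIdx? (fun c => decide ¬ c = "E")) with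
      | none => simp
      | some i => simp [List.set]
    · simp [popFishLoop, h, popFishLoop_true, popFish_alt, List.findIdx?_cons,
        List.set]

-- ===== VERDICT (by name: the statement is the Claim_ definition above) =====
theorem popFish_spec : Claim_equal_popFish := by
  intro door _
  unfold Spec_popFish
  exact popFish_eq_alt door
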